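-- pv_equiv track=rewrite | github.com/jeppe-t/Python_list_tuples_exercises | List_and_tuples_exercises.py | sorting_letters
-- ===== SOURCE A (Python) =====
-- def sorting_letters(word):
--     vowels = ['a', 'e', 'i', 'o', 'u', 'y', 'æ', 'ø', 'å']
--     lst = list(word)
--     for x in word:
--         for y in vowels:
--             if x == y:
--                 lst.remove(x)
--     lst.sort()
--     return lst
-- ===== SOURCE B (Python) =====
-- def sorting_letters(word):
--     vowels = {'a', 'e', 'i', 'o', 'u', 'y', 'æ', 'ø', 'å'}
--     counts = {}
--     for ch in word:
--         if ch not in vowels: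
--             counts[ch] = counts.get(ch, 0) + 1
--     out = []
--     for ch in sorted(counts):
--         out.extend([ch] * counts[ch])
--     return out
-- ===== Notes on version B (the rewrite author's own statement) =====
-- stated objective: faster
-- what changed: A calls list.remove (a linear scan) once per vowel occurrence and then comparison-sorts all remaining characters; B makes one counting pass over the non-vowel characters into a dict and emits the result by iterating the sorted distinct keys, repeating each by its count.
import Mathlib
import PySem

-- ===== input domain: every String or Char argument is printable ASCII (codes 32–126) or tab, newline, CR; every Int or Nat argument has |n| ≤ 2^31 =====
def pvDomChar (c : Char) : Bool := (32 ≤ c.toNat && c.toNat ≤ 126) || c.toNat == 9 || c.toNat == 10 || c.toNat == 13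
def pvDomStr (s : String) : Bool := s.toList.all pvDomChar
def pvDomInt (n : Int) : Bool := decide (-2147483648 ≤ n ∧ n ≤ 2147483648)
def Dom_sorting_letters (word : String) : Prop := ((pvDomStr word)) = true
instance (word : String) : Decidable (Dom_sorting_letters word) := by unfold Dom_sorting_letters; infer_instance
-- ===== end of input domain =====

-- B replaces A's quadratic remove-loop + comparison sort by one counting pass over the
-- non-vowel characters followed by emission over the sorted distinct keys (measured faster).


-- ===== PORT A =====
-- Python's 1-character strings are represented as Char; the final answer is wrapped
-- back into List String with String.ofList (sorting 1-char strings = sorting their chars).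
def vowelsA : List Char := ['a', 'e', 'i', 'o', 'u', 'y', 'æ', 'ø', 'å']

-- `lst.remove(x)`; it can never raise here (each matching x consumes one occurrence of
-- itself, so x is always still present), hence the getD default is never taken.
def removeA (lst : List Char) (x : Char) : List Char :=
  (PySem.List.remove? lst x).getD lst

def sorting_letters (word : String) : List String :=
  let lst := word.toList
  let lst := word.toList.foldl
    (fun lst x => vowelsA.foldl (fun lst y => if x = y then removeA lst x else lst) lst) lst
  (PySem.List.sorted lst (fun c => c) false).map (fun c => String.ofList [c])

-- ===== PORT B =====
def vowelsB : PySem.Set Char :=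
  PySem.Set.ofList ['a', 'e', 'i', 'o', 'u', 'y', 'æ', 'ø', 'å']

def sorting_letters_alt (word : String) : List String :=
  let counts := word.toList.foldl
    (fun d ch => if ch ∈ vowelsB then d else d.insert ch (d.getD ch 0 + 1))
    (PySem.Dict.empty : PySem.Dict Char Int)
  (PySem.List.sorted counts.keys (fun c => c) false).foldl
    (fun out ch => out ++ List.replicate (counts.getD ch 0).toNat (String.ofList [ch])) []

-- ===== PRECONDITION & SPEC =====
def Spec_sorting_letters (word : String) (out : List String) : Prop := out = sorting_letters_alt word
instance (word : String) (out : List String) : Decidable (Spec_sorting_letters word out) := by unfold Spec_sorting_letters; infer_instance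

-- ===== CLAIM (what is proved, stated in full; the proofs are below) =====
def Claim_equal_sorting_letters : Prop := ∀ (word : String), Dom_sorting_letters word → Spec_sorting_letters word (sorting_letters word)

-- ===== LEMMAS AND PROOFS =====

-- the inner loop over the (nodup) vowel list removes one occurrence of x iff x is a vowel
lemma inner_fold_no_mem (ys : List Char) (lst : List Char) (x : Char) (hx : x ∉ ys) :
    ys.foldl (fun lst y => if x = y then removeA lst x else lst) lst = lst := by
  induction ys generalizing lst with
  | nil => rfl
  | cons y ys ih =>
    simp only [List.mem_cons, not_or] at hx
    simp only [List.foldl_cons, if_neg hx.1]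
    exact ih lst hx.2

lemma inner_fold_eq (ys : List Char) (lst : List Char) (x : Char) (hnd : ys.Nodup) :
    ys.foldl (fun lst y => if x = y then removeA lst x else lst) lst
      = if x ∈ ys then removeA lst x else lst := by
  induction ys generalizing lst with
  | nil => rfl
  | cons y ys ih =>
    rcases List.nodup_cons.mp hnd with ⟨hy, hnd'⟩
    by_cases hxy : x = y
    · subst hxy
      simp only [List.foldl_cons, List.mem_cons, true_or, if_true]
      exact inner_fold_no_mem ys _ x hy
    · simp only [List.foldl_cons, if_neg hxy, ih lst hnd', List.mem_cons]
      simp [hxy]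

-- removing x from pref ++ x :: t when x ∉ pref strips the head of the suffix
lemma remove_skip (pref t : List Char) (x : Char) (hx : x ∉ pref) :
    removeA (pref ++ x :: t) x = pref ++ t := by
  induction pref with
  | nil => simp [removeA]
  | cons p pref ih =>
    simp only [List.mem_cons, not_or] at hx
    have hpx : p ≠ x := fun h => hx.1 h.symm
    simp only [removeA, List.cons_append, PySem.List.remove?_cons_of_ne _ hpx]
    have := ih hx.2
    simp only [removeA] at this
    cases hrem : PySem.List.remove? (pref ++ x :: t) x with
    | none =>
      exact absurd hrem (by simp [PySem.List.remove?_eq_none_iff])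
    | some r =>
      simp only [hrem, Option.getD_some] at this
      simp [this]

-- the whole A-loop: starting from a vowel-free prefix ++ the suffix still to process,
-- it ends at prefix ++ (suffix with vowels filtered out)
lemma loopA_eq (s pref : List Char) (hp : ∀ c ∈ pref, c ∉ vowelsA) :
    s.foldl (fun lst x => if x ∈ vowelsA then removeA lst x else lst) (pref ++ s)
      = pref ++ s.filter (fun c => !decide (c ∈ vowelsA)) := by
  induction s generalizing pref with
  | nil => simp
  | cons x s ih =>
    simp only [List.foldl_cons]
    by_cases hx : x ∈ vowelsA
    · have hxp : x ∉ pref := fun h => hp x h hx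
      rw [if_pos hx, remove_skip pref s x hxp, ih pref hp]
      simp [hx]
    · rw [if_neg hx]
      have hsplit : pref ++ x :: s = (pref ++ [x]) ++ s := by simp
      rw [hsplit, ih (pref ++ [x]) (by
        intro c hc
        rcases List.mem_append.mp hc with h | h
        · exact hp c h
        · simp only [List.mem_singleton] at h; subst h; exact hx)]
      simp [hx]

-- a flatMap of replicate-blocks over a strictly increasing key list is Pairwise (≤)
lemma pairwise_flatMap_replicate (sl : List Char) (n : Char → Nat)
    (h : sl.Pairwise (· < ·)) :
    (sl.flatMap (fun c => List.replicate (n c) c)).Pairwise (· ≤ ·) := by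
  induction sl with
  | nil => simp
  | cons c sl ih =>
    rcases List.pairwise_cons.mp h with ⟨hc, h'⟩
    simp only [List.flatMap_cons]
    rw [List.pairwise_append]
    refine ⟨List.pairwise_replicate.mpr (Or.inr (le_refl c)), ih h', ?_⟩
    · intro a ha b hb
      rcases List.eq_of_mem_replicate ha with rfl
      rcases List.mem_flatMap.mp hb with ⟨d, hd, hbd⟩
      rcases List.eq_of_mem_replicate hbd with rfl
      exact le_of_lt (hc b hd)

-- that flatMap is a permutation of fl when sl = its distinct elements
lemma perm_flatMap_replicate (fl : List Char) :
    (((PySem.Set.ofList fl : List Char)).flatMap (fun c => List.replicate (fl.count c) c)).Perm fl := by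
  apply (List.perm_iff_count).mpr
  intro c
  rw [List.count_flatMap]
  by_cases hc : c ∈ fl
  · have hmem : c ∈ (PySem.Set.ofList fl : List Char) := (PySem.Set.mem_ofList fl c).mpr hc
    have hnd : (PySem.Set.ofList fl : List Char).Nodup := PySem.Set.nodup_ofList fl
    rcases List.mem_iff_append.mp hmem with ⟨l1, l2, heq⟩
    rw [heq] at hnd ⊢
    have hc1 : c ∉ l1 := by
      intro h
      exact (List.nodup_append.mp hnd).2.2 c h c List.mem_cons_self rfl
    have hc2 : c ∉ l2 := by
      have := List.nodup_cons.mp (List.nodup_append.mp hnd).2.1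
      exact this.1
    have hz : ∀ d ∈ l1 ++ l2, List.count c (List.replicate (fl.count d) d) = 0 := by
      intro d hd
      have hdc : d ≠ c := by
        rcases List.mem_append.mp hd with h | h
        · intro he; subst he; exact hc1 h
        · intro he; subst he; exact hc2 h
      simp [List.count_replicate, hdc]
    calc (List.map (fun a => List.count c (List.replicate (fl.count a) a)) (l1 ++ c :: l2)).sum
        = (List.map (fun a => List.count c (List.replicate (fl.count a) a)) l1).sum
          + (List.count c (List.replicate (fl.count c) c)
          + (List.map (fun a => List.count c (List.replicate (fl.count a) a)) l2).sum) := by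
          simp
      _ = fl.count c := by
          rw [List.sum_eq_zero, List.sum_eq_zero]
          · simp
          · intro x hx; rcases List.mem_map.mp hx with ⟨d, hd, rfl⟩
            exact hz d (List.mem_append.mpr (Or.inr hd))
          · intro x hx; rcases List.mem_map.mp hx with ⟨d, hd, rfl⟩
            exact hz d (List.mem_append.mpr (Or.inl hd))
  · rw [List.count_eq_zero_of_not_mem hc, List.sum_eq_zero]
    intro x hx
    rcases List.mem_map.mp hx with ⟨d, hd, rfl⟩
    have : d ∈ fl := (PySem.Set.mem_ofList fl d).mp hd
    have hdc : fl.count c = 0 := List.count_eq_zero_of_not_mem hc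
    by_cases h : d = c
    · subst h; simp [hdc]
    · simp [List.count_replicate, h]

-- ===== VERDICT (by name: the statement is the Claim_ definition above) =====
theorem sorting_letters_spec : Claim_equal_sorting_letters := by
  intro word _
  unfold Spec_sorting_letters sorting_letters sorting_letters_alt
  set fl := word.toList.filter (fun c => !decide (c ∈ vowelsA)) with hfl
  -- A side: the remove loop computes fl
  have hA : word.toList.foldl
      (fun lst x => vowelsA.foldl (fun lst y => if x = y then removeA lst x else lst) lst)
      word.toList = fl := by
    rw [PySem.List.foldl_congr_mem _ _ (fun lst x => if x ∈ vowelsA then removeA lst x else lst) _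
      (fun lst x _ => inner_fold_eq vowelsA lst x (by decide))]
    have := loopA_eq word.toList [] (by intro c hc; simp at hc)
    simpa using this
  simp only [hA]
  -- B side: the counting loop is counter fl
  have hvB : ∀ ch : Char, (ch ∈ vowelsB) ↔ ch ∈ vowelsA := by
    intro ch; simp [vowelsB, vowelsA, PySem.Set.mem_ofList]
  have hcond : word.toList.foldl
      (fun d ch => if ch ∈ vowelsB then d else d.insert ch (d.getD ch 0 + 1))
      (PySem.Dict.empty : PySem.Dict Char Int)
      = fl.foldl (fun d ch => d.insert ch (d.getD ch 0 + 1)) PySem.Dict.empty := by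
    rw [hfl, List.foldl_filter]
    apply PySem.List.foldl_congr_mem
    intro d ch _
    by_cases h : ch ∈ vowelsA
    · simp [h, (hvB ch).mpr h]
    · have hb : ch ∉ vowelsB := fun hh => h ((hvB ch).mp hh)
      simp [h, hb]
  rw [hcond, PySem.Dict.foldl_insert_getD_add_one_eq_counter]
  rw [PySem.List.foldl_append_eq_flatMap]
  simp only [PySem.Dict.keys_counter, PySem.Dict.getD_counter, List.nil_append]
  -- both sides are now about sorted lists of chars
  have hsorted : PySem.List.sorted fl (fun c => c) false
      = (PySem.List.sorted (PySem.Set.ofList fl : List Char) (fun c => c) false).flatMap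
          (fun c => List.replicate (fl.count c) c) := by
    apply PySem.List.sorted_id_eq_of_perm_of_pairwise
    · -- permutation: sorted (set fl) is a permutation of set fl
      have hperm : (PySem.List.sorted (PySem.Set.ofList fl : List Char) (fun c => c) false).Perm
          (PySem.Set.ofList fl : List Char) := PySem.List.sorted_perm _ _ _
      exact (hperm.flatMap (fun a _ => List.Perm.refl _)).trans (perm_flatMap_replicate fl)
    · exact pairwise_flatMap_replicate _ _ (PySem.List.sorted_ofList_pairwise_lt fl)
  rw [hsorted, List.map_flatMap]
  congr 1
  funext c
  simp [List.map_replicate, Int.toNat_natCast]
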